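-- pv_equiv track=rewrite | github.com/lipatoS/Homeworks | Home_work_42/Home_2.py | rename
-- ===== SOURCE A (Python) =====
-- def rename(strings):
--     lst = [i + "," for i in strings.split(",")]
--     cols = len(lst)
--     lst[-1] = lst[-1][:-1]
--     for i in range(0, len(lst)):
--         if len(lst) <= 2:
--             lst[-1] = lst[-1][:-1]
--             break
--         if cols == len(lst):
--             cols -= 1
--             continue
--         if cols == 1:
--             break
--         if cols == len(lst) - 1:
--             lst[i] = lst[i].upper()
--             cols -= 1
--             continue
--         if cols == len(lst) - 2:
--             lst[i] = lst[i].title()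
--             cols -= 1
--             continue
--         if cols == len(lst) - 3:
--             lst[i] = f" {lst[i][1:-1] * 2},"
--             cols -= 1
--             continue
--     last_string = "".join(lst)
--     return f"{last_string}"
-- ===== SOURCE B (Python) =====
-- def rename(strings):
--     fields = strings.split(",")
--     n = len(fields)
--     if n == 1:
--         return fields[0][:-1]
--     if n == 2:
--         return fields[0] + "," + fields[1][:-1]
--     if n == 3:
--         return ",".join([fields[0], fields[1].upper(), fields[2]])
--     if n == 4:
--         return ",".join([fields[0], fields[1].upper(), fields[2].title(), fields[3]])
--     fields[1] = fields[1].upper()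
--     fields[2] = fields[2].title()
--     fields[3] = " " + fields[3][1:] * 2
--     return ",".join(fields)
-- ===== Notes on version B (the rewrite author's own statement) =====
-- stated objective: simpler
-- what changed: B splits once, branches directly on the field count and applies indexed transforms (upper/title/doubling) joined with ",", instead of A's per-element comma-append, negative-index restrip and cols-counter state-machine scan over the whole list.
import Mathlib
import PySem

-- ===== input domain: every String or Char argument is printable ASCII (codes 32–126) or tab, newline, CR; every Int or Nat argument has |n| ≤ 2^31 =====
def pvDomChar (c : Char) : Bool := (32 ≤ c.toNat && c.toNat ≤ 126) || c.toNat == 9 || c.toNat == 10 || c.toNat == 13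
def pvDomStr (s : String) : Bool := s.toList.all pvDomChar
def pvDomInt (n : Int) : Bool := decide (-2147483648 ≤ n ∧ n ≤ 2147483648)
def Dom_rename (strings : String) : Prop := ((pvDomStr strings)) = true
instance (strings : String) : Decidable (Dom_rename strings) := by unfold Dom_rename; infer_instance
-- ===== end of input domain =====

-- B replaces A's comma-append plus cols-counter state machine by a direct branch on the
-- field count with indexed transforms and a ",".join (objective: simpler).

-- Python str.title, ported by hand (no PySem primitive): an alphabetic character is
-- uppercased when the previous character is not alphabetic, lowercased otherwise;
-- exact on ASCII (the domain Dom_rename admits), where "cased" = alphabetic.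
def pvTitleGo : List Char → Bool → List Char
  | [], _ => []
  | c :: cs, prev =>
    (if PySem.Chars.isalpha c then
       (if prev then PySem.Chars.lowerChar c else PySem.Chars.upperChar c)
     else c) :: pvTitleGo cs (PySem.Chars.isalpha c)

def pyTitle (s : String) : String := String.ofList (pvTitleGo s.toList false)

-- ===== PORT A =====
-- A's for-loop: state = (remaining indices, lst, cols); `break`/loop-end return lst
def renameLoop : List Int → List String → Int → List String
  | [], lst, _ => lst
  | i :: is, lst, cols =>
    if (lst.length : Int) ≤ 2 then
      -- lst[-1] = lst[-1][:-1]; break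
      lst.set (lst.length - 1)
        (PySem.Str.slice ((PySem.List.pyGet? lst (-1)).getD "") none (some (-1)))
    else if cols = (lst.length : Int) then renameLoop is lst (cols - 1)
    else if cols = 1 then lst
    else if cols = (lst.length : Int) - 1 then
      renameLoop is (lst.set i.toNat
        (PySem.Str.upper ((PySem.List.pyGet? lst i).getD ""))) (cols - 1)
    else if cols = (lst.length : Int) - 2 then
      renameLoop is (lst.set i.toNat
        (pyTitle ((PySem.List.pyGet? lst i).getD ""))) (cols - 1)
    else if cols = (lst.length : Int) - 3 then
      -- lst[i] = f" {lst[i][1:-1] * 2},"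
      renameLoop is (lst.set i.toNat
        (" " ++ (fun m => m ++ m)
           (PySem.Str.slice ((PySem.List.pyGet? lst i).getD "") (some 1) (some (-1))) ++ ","))
        (cols - 1)
    else renameLoop is lst cols

-- strings.split(",") with its nonempty separator is PySem.Chars.splitOn (Str.split? unwrapped)
def rename (strings : String) : String :=
  let lst := ((PySem.Chars.splitOn strings.toList [',']).map String.ofList).map (fun i => i ++ ",")
  let cols : Int := lst.length
  let lst := lst.set (lst.length - 1)
    (PySem.Str.slice ((PySem.List.pyGet? lst (-1)).getD "") none (some (-1)))
  let lst := renameLoop (PySem.List.pyRange 0 (lst.length : Int)) lst cols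
  PySem.Str.join "" lst

-- ===== PORT B =====
def rename_alt (strings : String) : String :=
  let fields := (PySem.Chars.splitOn strings.toList [',']).map String.ofList
  match fields with
  | [] => ""  -- unreachable: str.split never returns an empty list
  | [f0] => PySem.Str.slice f0 none (some (-1))
  | [f0, f1] => f0 ++ "," ++ PySem.Str.slice f1 none (some (-1))
  | [f0, f1, f2] => PySem.Str.join "," [f0, PySem.Str.upper f1, f2]
  | [f0, f1, f2, f3] => PySem.Str.join "," [f0, PySem.Str.upper f1, pyTitle f2, f3]
  | f0 :: f1 :: f2 :: f3 :: rest =>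
    let t := PySem.Str.slice f3 (some 1) none
    PySem.Str.join "," (f0 :: PySem.Str.upper f1 :: pyTitle f2 :: (" " ++ (t ++ t)) :: rest)

-- ===== PRECONDITION & SPEC =====
def Spec_rename (strings : String) (out : String) : Prop := out = rename_alt strings
instance (strings : String) (out : String) : Decidable (Spec_rename strings out) := by unfold Spec_rename; infer_instance

-- ===== CLAIM (what is proved, stated in full; the proofs are below) =====
def Claim_equal_rename : Prop := ∀ (strings : String), Dom_rename strings → Spec_rename strings (rename strings)

-- ===== LEMMAS AND PROOFS =====

theorem comma_toList : (",".toList : List Char) = [','] := by decide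

theorem upper_append_comma (s : String) :
    PySem.Str.upper (s ++ ",") = PySem.Str.upper s ++ "," := by
  apply String.toList_inj.mp
  simp only [PySem.Str.toList_upper, String.toList_append, PySem.Chars.upper, List.map_append]
  norm_num
  decide

theorem pvTitleGo_append_comma (l : List Char) (p : Bool) :
    pvTitleGo (l ++ [',']) p = pvTitleGo l p ++ [','] := by
  induction l generalizing p with
  | nil => cases p <;> decide
  | cons c cs ih => simp [pvTitleGo, ih]

theorem title_append_comma (s : String) :
    pyTitle (s ++ ",") = pyTitle s ++ "," := by
  apply String.toList_inj.mp
  simp [pyTitle, String.toList_append, comma_toList, pvTitleGo_append_comma]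

theorem slice_append_comma (s : String) :
    PySem.Str.slice (s ++ ",") none (some (-1)) = s := by
  apply String.toList_inj.mp
  simp only [PySem.Str.toList_slice, PySem.Chars.slice_eq_listSlice, String.toList_append,
    PySem.List.slice_to_neg_one, comma_toList, List.dropLast_concat]

theorem chars_slice_mid (l : List Char) :
    PySem.List.slice (l ++ [',']) (some 1) (some (-1)) = PySem.List.slice l (some 1) none := by
  simp only [PySem.List.slice, PySem.List.clampIdx]
  cases l with
  | nil => decide
  | cons c l' =>
    norm_num
    rw [if_neg (by omega)]
    simp

theorem slice_mid_append_comma (s : String) :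
    PySem.Str.slice (s ++ ",") (some 1) (some (-1)) = PySem.Str.slice s (some 1) none := by
  apply String.toList_inj.mp
  simp only [PySem.Str.toList_slice, PySem.Chars.slice_eq_listSlice, String.toList_append,
    comma_toList]
  exact chars_slice_mid s.toList

theorem chars_join_comma (xs : List (List Char)) (y : List Char) :
    PySem.Chars.join [] (xs.map (· ++ [',']) ++ [y]) = PySem.Chars.join [','] (xs ++ [y]) := by
  induction xs with
  | nil => simp [PySem.Chars.join_singleton]
  | cons a l ih =>
    cases l with
    | nil => simp [PySem.Chars.join_cons_cons, PySem.Chars.join_singleton]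
    | cons b m =>
      simp only [List.map_cons, List.cons_append, PySem.Chars.join_cons_cons] at *
      simp [ih]

theorem join_comma (xs : List String) (y : String) :
    PySem.Str.join "" (xs.map (· ++ ",") ++ [y]) = PySem.Str.join "," (xs ++ [y]) := by
  apply String.toList_inj.mp
  simp only [PySem.Str.toList_join, List.map_append, List.map_map, List.map_cons, List.map_nil]
  have h : List.map (String.toList ∘ fun x => x ++ ",") xs
      = List.map (fun l => l ++ [',']) (xs.map String.toList) := by
    simp [Function.comp, String.toList_append, comma_toList]
  rw [h, comma_toList]
  have := chars_join_comma (xs.map String.toList) y.toList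
  simpa using this

theorem renameLoop_noop (is : List Int) (lst : List String) (cols : Int)
    (h2 : 2 < (lst.length : Int))
    (ha : cols ≠ (lst.length : Int)) (hb : cols ≠ (lst.length : Int) - 1)
    (hc : cols ≠ (lst.length : Int) - 2) (hd : cols ≠ (lst.length : Int) - 3) :
    renameLoop is lst cols = lst := by
  induction is with
  | nil => rfl
  | cons i is ih =>
    rw [renameLoop, if_neg (by omega), if_neg ha]
    by_cases h1 : cols = 1
    · rw [if_pos h1]
    · rw [if_neg h1, if_neg hb, if_neg hc, if_neg hd, ih]

theorem loop_main (a b c d : String) (T : List String) (hT : 1 ≤ T.length) :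
    renameLoop (PySem.List.pyRange 0 ((T.length + 4 : Nat) : Int)) (a::b::c::d::T)
      ((T.length + 4 : Nat) : Int)
    = a :: PySem.Str.upper b :: pyTitle c ::
      (" " ++ (PySem.Str.slice d (some 1) (some (-1)) ++ PySem.Str.slice d (some 1) (some (-1))) ++ ",") :: T := by
  rw [PySem.List.pyRange_one_cons (by push_cast; omega)]
  rw [PySem.List.pyRange_one_cons (by push_cast; omega)]
  rw [PySem.List.pyRange_one_cons (by push_cast; omega)]
  rw [PySem.List.pyRange_one_cons (by push_cast; omega)]
  norm_num
  rw [renameLoop, if_neg (by simp; omega), if_pos (by simp; omega)]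
  rw [renameLoop, if_neg (by simp; omega), if_neg (by simp; omega),
      if_neg (by omega), if_pos (by simp; omega)]
  rw [show (1:Int) = ((1:Nat):Int) from rfl, PySem.List.pyGet?_natCast]
  norm_num
  rw [renameLoop, if_neg (by simp; omega), if_neg (by simp; omega),
      if_neg (by omega), if_neg (by simp; omega), if_pos (by simp; omega)]
  rw [show (2:Int) = ((2:Nat):Int) from rfl, PySem.List.pyGet?_natCast]
  norm_num
  rw [renameLoop, if_neg (by simp; omega), if_neg (by simp; omega),
      if_neg (by omega), if_neg (by simp; omega), if_neg (by simp; omega),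
      if_pos (by simp; omega)]
  rw [show (3:Int) = ((3:Nat):Int) from rfl, PySem.List.pyGet?_natCast]
  norm_num
  rw [renameLoop_noop _ _ _ (by simp; omega) (by simp; omega)
    (by simp; omega) (by simp; omega) (by simp; omega)]
  simp

theorem set_last_concat (l : List String) (z v : String) :
    (l ++ [z]).set ((l ++ [z]).length - 1) v = l ++ [v] := by
  simp [List.set_append_right]

theorem pyGet_last_concat (l : List String) (z : String) :
    PySem.List.pyGet? (l ++ [z]) (-1) = some z := by
  simp [PySem.List.pyGet?, PySem.List.pyIdx?]

-- ===== VERDICT (by name: the statement is the Claim_ definition above) =====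
theorem rename_spec : Claim_equal_rename := by
  intro s _h
  show rename s = rename_alt s
  rw [rename, rename_alt]
  generalize (PySem.Chars.splitOn s.toList [',']).map String.ofList = fields
  rcases fields with _ | ⟨f0, _ | ⟨f1, _ | ⟨f2, _ | ⟨f3, rest⟩⟩⟩⟩
  · -- fields = [] (unreachable for real split output, but both sides give "")
    apply String.toList_inj.mp
    simp [renameLoop, PySem.Str.toList_join, PySem.Chars.join_nil,
      show PySem.List.pyRange 0 0 = [] from by decide]
  · -- one field
    simp only [List.map_cons, List.map_nil, List.length_cons, List.length_nil, List.length_set]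
    norm_num [PySem.List.pyGet?, PySem.List.pyIdx?, slice_append_comma]
    rw [show PySem.List.pyRange 0 1 = [0] from by decide]
    rw [renameLoop, if_pos (by norm_num)]
    norm_num [PySem.List.pyGet?, PySem.List.pyIdx?]
    apply String.toList_inj.mp
    simp [PySem.Str.toList_join, PySem.Chars.join_singleton]
  · -- two fields
    simp only [List.map_cons, List.map_nil, List.length_cons, List.length_nil, List.length_set]
    norm_num [PySem.List.pyGet?, PySem.List.pyIdx?, slice_append_comma]
    rw [show PySem.List.pyRange 0 2 = [0, 1] from by decide]
    rw [renameLoop, if_pos (by norm_num)]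
    norm_num [PySem.List.pyGet?, PySem.List.pyIdx?]
    apply String.toList_inj.mp
    simp [PySem.Str.toList_join, PySem.Chars.join_cons_cons, PySem.Chars.join_singleton,
      String.toList_append]
  · -- three fields
    simp only [List.map_cons, List.map_nil, List.length_cons, List.length_nil, List.length_set]
    norm_num [PySem.List.pyGet?, PySem.List.pyIdx?, slice_append_comma]
    rw [show PySem.List.pyRange 0 3 = [0, 1, 2] from by decide]
    rw [renameLoop, if_neg (by norm_num), if_pos (by norm_num)]
    rw [renameLoop, if_neg (by norm_num), if_neg (by norm_num), if_neg (by norm_num),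
        if_pos (by norm_num)]
    norm_num [PySem.List.pyGet?, PySem.List.pyIdx?]
    rw [renameLoop, if_neg (by norm_num), if_neg (by norm_num), if_pos rfl]
    rw [upper_append_comma]
    apply String.toList_inj.mp
    simp [PySem.Str.toList_join, PySem.Chars.join_cons_cons, PySem.Chars.join_singleton,
      String.toList_append]
  · -- four or more fields
    rcases rest with _ | ⟨r0, rs⟩
    · -- exactly four fields
      simp only [List.map_cons, List.map_nil, List.length_cons, List.length_nil, List.length_set]
      norm_num [PySem.List.pyGet?, PySem.List.pyIdx?, slice_append_comma]
      rw [show PySem.List.pyRange 0 4 = [0, 1, 2, 3] from by decide]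
      rw [renameLoop, if_neg (by norm_num), if_pos (by norm_num)]
      rw [renameLoop, if_neg (by norm_num), if_neg (by norm_num), if_neg (by norm_num),
          if_pos (by norm_num)]
      norm_num [PySem.List.pyGet?, PySem.List.pyIdx?]
      rw [renameLoop, if_neg (by norm_num), if_neg (by norm_num), if_neg (by norm_num),
          if_neg (by norm_num), if_pos (by norm_num)]
      norm_num [PySem.List.pyGet?, PySem.List.pyIdx?]
      simp only [show Int.toNat 2 = 2 from rfl, List.getElem_cons_succ, List.getElem_cons_zero, List.set]
      rw [renameLoop, if_neg (by norm_num), if_neg (by norm_num), if_pos rfl]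
      rw [upper_append_comma, title_append_comma]
      apply String.toList_inj.mp
      simp [PySem.Str.toList_join, PySem.Chars.join_cons_cons, PySem.Chars.join_singleton,
        String.toList_append]
    · -- five or more fields
      rcases List.eq_nil_or_concat (r0 :: rs) with h | ⟨mid, z, hmz⟩
      · simp at h
      rw [hmz, List.concat_eq_append]
      have hmap : (f0::f1::f2::f3::(mid++[z])).map (fun i => i ++ ",")
          = (((f0++",")::(f1++",")::(f2++",")::(f3++",")::mid.map (fun i => i ++ ",")) ++ [z ++ ","]) := by
        simp
      rw [hmap, pyGet_last_concat, set_last_concat]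
      norm_num [slice_append_comma]
      have hc : ((mid.length : Int) + 1 + 1 + 1 + 1 + 1)
          = (((List.map (fun i => i ++ ",") mid ++ [z]).length + 4 : Nat) : Int) := by
        simp; ring
      rw [hc, loop_main _ _ _ _ _ (by simp)]
      rw [upper_append_comma, title_append_comma, slice_mid_append_comma]
      have hj := join_comma ([f0, PySem.Str.upper f1, pyTitle f2,
        " " ++ (PySem.Str.slice f3 (some 1) none ++ PySem.Str.slice f3 (some 1) none)] ++ mid) z
      simp only [List.map_append, List.map_cons, List.cons_append,
        List.nil_append] at hj
      rw [hj]
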